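-- pv_equiv track=rewrite | github.com/vidzza/GODEYE | ingest_v2.py | _build_text_from_chars
-- ===== SOURCE A (Python) =====
-- from typing import Iterator, Dict, List, Optional, Tuple
--
-- def _build_text_from_chars(chars: List[str]) -> str:
--     result = []
--     for c in chars:
--         if c == '\x08':
--             if result:
--                 result.pop()
--         else:
--             result.append(c)
--     return ''.join(result)
-- ===== SOURCE B (Python) =====
-- def _build_text_from_chars(chars):
--     kept = []
--     skip = 0
--     for c in reversed(chars):
--         if c == '\x08':
--             skip += 1
--         elif skip > 0:
--             skip -= 1
--         else:
--             kept.append(c)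
--     kept.reverse()
--     return ''.join(kept)
-- ===== Notes on version B (the rewrite author's own statement) =====
-- stated objective: alternative
-- what changed: Replaces the forward stack with append/pop by a single right-to-left scan carrying an integer skip counter, keeping a char only when no pending backspace remains, then reversing the kept chars.
import Mathlib
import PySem

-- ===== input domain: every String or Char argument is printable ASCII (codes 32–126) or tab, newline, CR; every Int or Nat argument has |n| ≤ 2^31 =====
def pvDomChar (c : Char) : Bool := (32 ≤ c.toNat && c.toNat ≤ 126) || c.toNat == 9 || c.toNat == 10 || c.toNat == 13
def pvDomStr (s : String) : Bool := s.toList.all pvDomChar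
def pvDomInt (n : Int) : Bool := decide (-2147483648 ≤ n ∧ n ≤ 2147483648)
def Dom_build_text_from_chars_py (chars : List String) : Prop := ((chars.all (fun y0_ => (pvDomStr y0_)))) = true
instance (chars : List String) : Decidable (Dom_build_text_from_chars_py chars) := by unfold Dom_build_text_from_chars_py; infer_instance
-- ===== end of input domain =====

-- B replaces A's forward append/pop stack by a right-to-left scan with a skip counter (alternative decomposition, same cost).

-- ===== PORT A =====
-- one iteration of A's loop: pop on backspace (only if non-empty), else append
def btfcStep (res : List String) (c : String) : List String :=
  if c = "\x08" then (if res ≠ [] then res.dropLast else res) else res ++ [c]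

def build_text_from_chars_py (chars : List String) : String :=
  PySem.Str.join "" (chars.foldl btfcStep [])

-- ===== PORT B =====
-- right-to-left scan of Source B: kept chars accumulate in reversed order, skip counts pending backspaces
def btfcScan : List String → Nat → List String
  | [], _ => []
  | c :: rest, skip =>
      if c = "\x08" then btfcScan rest (skip + 1)
      else if skip > 0 then btfcScan rest (skip - 1)
      else c :: btfcScan rest skip

def build_text_from_chars_py_alt (chars : List String) : String :=
  PySem.Str.join "" ((btfcScan chars.reverse 0).reverse)

-- ===== PRECONDITION & SPEC =====
def Spec_build_text_from_chars_py (chars : List String) (out : String) : Prop := out = build_text_from_chars_py_alt chars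
instance (chars : List String) (out : String) : Decidable (Spec_build_text_from_chars_py chars out) := by unfold Spec_build_text_from_chars_py; infer_instance

-- ===== CLAIM (what is proved, stated in full; the proofs are below) =====
def Claim_equal_build_text_from_chars_py : Prop := ∀ (chars : List String), Dom_build_text_from_chars_py chars → Spec_build_text_from_chars_py chars (build_text_from_chars_py chars)

-- ===== LEMMAS AND PROOFS =====

theorem btfcStep_bs (res : List String) : btfcStep res "\x08" = res.dropLast := by
  unfold btfcStep
  by_cases h : res = [] <;> simp [h]

theorem btfcStep_ne (res : List String) (c : String) (h : c ≠ "\x08") :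
    btfcStep res c = res ++ [c] := by
  simp [btfcStep, h]

theorem foldl_replicate_bs_nil (k : Nat) :
    List.foldl btfcStep [] (List.replicate k "\x08") = [] := by
  induction k with
  | zero => rfl
  | succ n ih => simpa [List.replicate_succ, btfcStep_bs] using ih

-- key invariant: scanning r right-to-left with skip pending backspaces equals
-- running A's stack on r.reverse followed by skip extra backspaces
theorem btfcScan_eq (r : List String) (k : Nat) :
    (btfcScan r k).reverse =
      List.foldl btfcStep [] (r.reverse ++ List.replicate k "\x08") := by
  induction r generalizing k with
  | nil => simp [btfcScan, foldl_replicate_bs_nil]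
  | cons c rest ih =>
      by_cases hc : c = "\x08"
      · subst hc
        show (btfcScan rest (k + 1)).reverse = _
        rw [ih (k + 1)]
        simp [List.replicate_succ, List.foldl_append]
      · rcases k with _ | k'
        · rw [show btfcScan (c :: rest) 0 = c :: btfcScan rest 0 from by simp [btfcScan, hc]]
          rw [List.reverse_cons, ih 0]
          simp [List.foldl_append, btfcStep_ne _ _ hc]
        · rw [show btfcScan (c :: rest) (k' + 1) = btfcScan rest k' from by simp [btfcScan, hc]]
          rw [ih k']
          simp only [List.reverse_cons, List.replicate_succ, List.foldl_append,
            List.foldl_cons, btfcStep_ne _ _ hc, btfcStep_bs]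
          simp

theorem btfc_lists_eq (chars : List String) :
    (btfcScan chars.reverse 0).reverse = List.foldl btfcStep [] chars := by
  simpa using btfcScan_eq chars.reverse 0

-- ===== VERDICT (by name: the statement is the Claim_ definition above) =====
theorem build_text_from_chars_py_spec : Claim_equal_build_text_from_chars_py := by
  intro chars _
  unfold Spec_build_text_from_chars_py build_text_from_chars_py build_text_from_chars_py_alt
  rw [btfc_lists_eq]
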